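-- pv_equiv track=rewrite | github.com/prithivirajmurugan/Notes | Algorithm_DataStructures/find_max_j_minus_i.py | findMaxJMinusI
-- ===== SOURCE A (Python) =====
-- def findMaxJMinusI(arr):
--     maxDiff = -1
--     n=len(arr)
--     for i in range(0,n):
--        j=n-1
--        while(j>i):
--            if arr[j]>arr[i] and maxDiff < j-i:
--                maxDiff = j-i
--            j-=1
--     return maxDiff
-- ===== SOURCE B (Python) =====
-- def findMaxJMinusI(arr):
--     # Scan candidate gaps d from largest to smallest; the first gap that is
--     # realized by some pair arr[i+d] > arr[i] is the answer.
--     n = len(arr)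
--     for d in range(n - 1, 0, -1):
--         if any(arr[i + d] > arr[i] for i in range(n - d)):
--             return d
--     return -1
-- ===== Notes on version B (the rewrite author's own statement) =====
-- stated objective: faster
-- what changed: B replaces A's full double loop over all (i,j) pairs by a descending scan over candidate gap sizes d=n-1..1 that returns the first gap realized by some pair arr[i+d]>arr[i], so it exits as soon as the largest valid gap is found (typically after scanning only a few gaps); worst case is still quadratic.
import Mathlib
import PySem

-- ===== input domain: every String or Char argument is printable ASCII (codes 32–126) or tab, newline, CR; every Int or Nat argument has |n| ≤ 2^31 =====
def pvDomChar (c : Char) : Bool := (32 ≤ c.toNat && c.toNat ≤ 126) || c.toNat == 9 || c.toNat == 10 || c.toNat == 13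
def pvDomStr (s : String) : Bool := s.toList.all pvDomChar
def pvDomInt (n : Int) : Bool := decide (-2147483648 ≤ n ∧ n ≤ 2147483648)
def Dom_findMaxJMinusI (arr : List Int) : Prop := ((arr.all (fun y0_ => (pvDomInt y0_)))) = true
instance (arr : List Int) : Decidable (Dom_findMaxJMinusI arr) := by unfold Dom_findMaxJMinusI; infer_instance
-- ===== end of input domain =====

-- B scans candidate gaps d = n-1, n-2, … and returns the first realized gap (early exit),
-- instead of A's full double loop over all pairs; same return value on every input.

-- ===== PORT A =====
-- indices i, j are always in [0, n), so pyGetD is exact for Python's arr[i], arr[j]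
def pvInnerA (arr : List Int) (i j maxDiff : Int) : Int :=
  if h : i < j then
    pvInnerA arr i (j - 1)
      (if PySem.List.pyGetD arr j 0 > PySem.List.pyGetD arr i 0 ∧ maxDiff < j - i then j - i
       else maxDiff)
  else maxDiff
termination_by (j - i).toNat
decreasing_by omega

def findMaxJMinusI (arr : List Int) : Int :=
  let n : Int := arr.length
  (PySem.List.pyRange 0 n 1).foldl (fun maxDiff i => pvInnerA arr i (n - 1) maxDiff) (-1)

-- ===== PORT B =====
-- any(arr[i + d] > arr[i] for i in range(n - d)); indices in range, pyGetD exact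
def pvCheckGap (arr : List Int) (d : Int) : Bool :=
  (PySem.List.pyRange 0 ((arr.length : Int) - d) 1).any
    (fun i => PySem.List.pyGetD arr (i + d) 0 > PySem.List.pyGetD arr i 0)

-- the 'for d in range(n-1, 0, -1): if …: return d' loop
def pvScanGap (arr : List Int) (d : Int) : Int :=
  if h : 0 < d then
    if pvCheckGap arr d then d else pvScanGap arr (d - 1)
  else -1
termination_by d.toNat
decreasing_by omega

def findMaxJMinusI_alt (arr : List Int) : Int :=
  pvScanGap arr ((arr.length : Int) - 1)

-- ===== PRECONDITION & SPEC =====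
def Spec_findMaxJMinusI (arr : List Int) (out : Int) : Prop := out = findMaxJMinusI_alt arr
instance (arr : List Int) (out : Int) : Decidable (Spec_findMaxJMinusI arr out) := by unfold Spec_findMaxJMinusI; infer_instance

-- ===== CLAIM (what is proved, stated in full; the proofs are below) =====
def Claim_equal_findMaxJMinusI : Prop := ∀ (arr : List Int), Dom_findMaxJMinusI arr → Spec_findMaxJMinusI arr (findMaxJMinusI arr)

-- ===== LEMMAS AND PROOFS =====

-- a valid pair (i, j): i < j and arr[j] > arr[i]
def PvPair (arr : List Int) (i j : Int) : Prop :=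
  0 ≤ i ∧ i < j ∧ j < (arr.length : Int) ∧
    PySem.List.pyGetD arr i 0 < PySem.List.pyGetD arr j 0

theorem pvInnerA_spec (arr : List Int) (i j acc : Int) :
    acc ≤ pvInnerA arr i j acc ∧
    (pvInnerA arr i j acc = acc ∨
      ∃ k, i < k ∧ k ≤ j ∧ PySem.List.pyGetD arr i 0 < PySem.List.pyGetD arr k 0 ∧
        pvInnerA arr i j acc = k - i) ∧
    (∀ k, i < k → k ≤ j → PySem.List.pyGetD arr i 0 < PySem.List.pyGetD arr k 0 →
      k - i ≤ pvInnerA arr i j acc) := by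
  fun_induction pvInnerA arr i j acc with
  | case1 j acc h ih =>
    simp only [dite_eq_ite] at ih
    obtain ⟨ih1, ih2, ih3⟩ := ih
    refine ⟨?_, ?_, ?_⟩
    · split_ifs at ih1 ⊢ with hc
      · omega
      · exact ih1
    · rcases ih2 with heq | ⟨k, hk1, hk2, hk3, hk4⟩
      · rw [heq]
        split_ifs with hc
        · exact Or.inr ⟨j, h, le_refl j, by omega, rfl⟩
        · exact Or.inl rfl
      · exact Or.inr ⟨k, hk1, by omega, hk3, hk4⟩
    · intro k hk1 hk2 hk3
      by_cases hkj : k ≤ j - 1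
      · exact ih3 k hk1 hkj hk3
      · have hkeq : k = j := by omega
        subst hkeq
        split_ifs at ih1 ⊢ with hc
        · omega
        · omega
  | case2 j acc h =>
    exact ⟨le_refl _, Or.inl rfl, fun k hk1 hk2 _ => by omega⟩

theorem pvFold_spec(arr : List Int) (l : List Int) (acc : Int) :
    acc ≤ l.foldl (fun a i => pvInnerA arr i ((arr.length : Int) - 1) a) acc ∧
    (l.foldl (fun a i => pvInnerA arr i ((arr.length : Int) - 1) a) acc = acc ∨
      ∃ i k, i ∈ l ∧ i < k ∧ k ≤ (arr.length : Int) - 1 ∧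
        PySem.List.pyGetD arr i 0 < PySem.List.pyGetD arr k 0 ∧
        l.foldl (fun a i => pvInnerA arr i ((arr.length : Int) - 1) a) acc = k - i) ∧
    (∀ i k, i ∈ l → i < k → k ≤ (arr.length : Int) - 1 →
      PySem.List.pyGetD arr i 0 < PySem.List.pyGetD arr k 0 →
      k - i ≤ l.foldl (fun a i => pvInnerA arr i ((arr.length : Int) - 1) a) acc) := by
  induction l generalizing acc with
  | nil => exact ⟨le_refl _, Or.inl rfl, fun i k h => by simp at h⟩
  | cons i0 l ih =>
    simp only [List.foldl_cons]
    obtain ⟨m1, m2, m3⟩ := pvInnerA_spec arr i0 ((arr.length : Int) - 1) acc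
    obtain ⟨ih1, ih2, ih3⟩ := ih (pvInnerA arr i0 ((arr.length : Int) - 1) acc)
    refine ⟨le_trans m1 ih1, ?_, ?_⟩
    · rcases ih2 with heq | ⟨i, k, hmem, hik, hkn, hlt, hval⟩
      · rw [heq]
        rcases m2 with heq2 | ⟨k, hik, hkn, hlt, hval⟩
        · exact Or.inl heq2
        · exact Or.inr ⟨i0, k, List.mem_cons_self, hik, hkn, hlt, hval⟩
      · exact Or.inr ⟨i, k, List.mem_cons_of_mem _ hmem, hik, hkn, hlt, hval⟩
    · intro i k hmem hik hkn hlt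
      rcases List.mem_cons.mp hmem with rfl | hmem'
      · exact le_trans (m3 k hik hkn hlt) ih1
      · exact ih3 i k hmem' hik hkn hlt

theorem pvA_char (arr : List Int) :
    -1 ≤ findMaxJMinusI arr ∧
    (findMaxJMinusI arr = -1 ∨ ∃ i j, PvPair arr i j ∧ findMaxJMinusI arr = j - i) ∧
    (∀ i j, PvPair arr i j → j - i ≤ findMaxJMinusI arr) := by
  unfold findMaxJMinusI
  obtain ⟨h1, h2, h3⟩ := pvFold_spec arr (PySem.List.pyRange 0 (arr.length : Int) 1) (-1)
  refine ⟨h1, ?_, ?_⟩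
  · rcases h2 with heq | ⟨i, k, hmem, hik, hkn, hlt, hval⟩
    · exact Or.inl heq
    · have hi := (PySem.List.mem_pyRange_one).mp hmem
      exact Or.inr ⟨i, k, ⟨hi.1, hik, by omega, hlt⟩, hval⟩
  · intro i j ⟨hp1, hp2, hp3, hp4⟩
    exact h3 i j ((PySem.List.mem_pyRange_one).mpr ⟨hp1, by omega⟩) hp2 (by omega) hp4

theorem pvCheckGap_iff (arr : List Int) (d : Int) :
    pvCheckGap arr d = true ↔
      ∃ i, 0 ≤ i ∧ i + d < (arr.length : Int) ∧
        PySem.List.pyGetD arr i 0 < PySem.List.pyGetD arr (i + d) 0 := by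
  unfold pvCheckGap
  simp only [List.any_eq_true, PySem.List.mem_pyRange_one, decide_eq_true_eq, gt_iff_lt]
  constructor
  · rintro ⟨i, ⟨hi0, hin⟩, hlt⟩; exact ⟨i, hi0, by omega, hlt⟩
  · rintro ⟨i, hi0, hin, hlt⟩; exact ⟨i, ⟨hi0, by omega⟩, hlt⟩

theorem pvScan_spec(arr : List Int) (d : Int) :
    (pvScanGap arr d = -1 ∨
      (0 < pvScanGap arr d ∧ pvScanGap arr d ≤ d ∧ pvCheckGap arr (pvScanGap arr d) = true)) ∧
    (∀ d', 0 < d' → d' ≤ d → pvCheckGap arr d' = true → d' ≤ pvScanGap arr d) := by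
  fun_induction pvScanGap arr d with
  | case1 d h hc =>
    exact ⟨Or.inr ⟨h, le_refl d, hc⟩, fun d' _ hd' _ => hd'⟩
  | case2 d h hc ih =>
    obtain ⟨ih1, ih2⟩ := ih
    refine ⟨?_, fun d' hd'0 hd'd hd'c => ?_⟩
    · rcases ih1 with h1 | ⟨a,b,c⟩
      · exact Or.inl h1
      · exact Or.inr ⟨a, by omega, c⟩
    by_cases hdd : d' ≤ d - 1
    · exact ih2 d' hd'0 hdd hd'c
    · have : d' = d := by omega
      subst this
      exact absurd hd'c (by simp [hc])
  | case3 d h =>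
    exact ⟨Or.inl rfl, fun d' hd'0 hd'd _ => by omega⟩

theorem pvB_char (arr : List Int) :
    -1 ≤ findMaxJMinusI_alt arr ∧
    (findMaxJMinusI_alt arr = -1 ∨ ∃ i j, PvPair arr i j ∧ findMaxJMinusI_alt arr = j - i) ∧
    (∀ i j, PvPair arr i j → j - i ≤ findMaxJMinusI_alt arr) := by
  unfold findMaxJMinusI_alt
  obtain ⟨h1, h2⟩ := pvScan_spec arr ((arr.length : Int) - 1)
  refine ⟨?_, ?_, ?_⟩
  · rcases h1 with heq | ⟨hpos, _, _⟩ <;> omega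
  · rcases h1 with heq | ⟨hpos, hle, hc⟩
    · exact Or.inl heq
    · obtain ⟨i, hi0, hin, hlt⟩ := (pvCheckGap_iff arr _).mp hc
      exact Or.inr ⟨i, i + pvScanGap arr ((arr.length : Int) - 1),
        ⟨hi0, by omega, hin, hlt⟩, by omega⟩
  · intro i j ⟨hp1, hp2, hp3, hp4⟩
    have hc : pvCheckGap arr (j - i) = true :=
      (pvCheckGap_iff arr (j - i)).mpr ⟨i, hp1, by omega, by rw [show i + (j - i) = j by omega]; exact hp4⟩
    exact h2 (j - i) (by omega) (by omega) hc

-- ===== VERDICT (by name: the statement is the Claim_ definition above) =====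
theorem findMaxJMinusI_spec : Claim_equal_findMaxJMinusI := by
  intro arr _
  unfold Spec_findMaxJMinusI
  obtain ⟨ha1, ha2, ha3⟩ := pvA_char arr
  obtain ⟨hb1, hb2, hb3⟩ := pvB_char arr
  rcases ha2 with ha | ⟨i, j, hp, ha⟩
  · rcases hb2 with hb | ⟨i, j, hp, hb⟩
    · omega
    · have := ha3 i j hp
      have : 1 ≤ j - i := by obtain ⟨_, h2, _, _⟩ := hp; omega
      omega
  · have h1 := hb3 i j hp
    rcases hb2 with hb | ⟨i', j', hp', hb⟩
    · have : 1 ≤ j - i := by obtain ⟨_, h2, _, _⟩ := hp; omega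
      omega
    · have h2 := ha3 i' j' hp'
      omega
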